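-- pv_equiv track=rewrite | github.com/ParanoidHW/jazz | python/utils/misc.py | check_elementwise_dim_compatible
-- ===== SOURCE A (Python) =====
-- def check_elementwise_dim_compatible(a_shape, ref_shape):
--     ndim_a = len(a_shape)
--     ndim_ref = len(ref_shape)
--     assert ndim_a == ndim_ref, 'Dimension not equal: {} vs {}.'.format(ndim_a, ndim_ref)
--     compatible = True
--     aggregated_axes = []
--     for i, (dim_a, dim_ref) in enumerate(zip(a_shape, ref_shape)):
--         # `ref_shape` is supposed to be the shape of the operator result.
--         # So ref_shape[i] >= a_shape[i] at every where
--         if dim_a != dim_ref and dim_a != 1: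
--             compatible = False
--             return compatible, aggregated_axes
--         elif dim_a == 1:
--             aggregated_axes.append(i)
--     return compatible, aggregated_axes
-- ===== SOURCE B (Python) =====
-- def check_elementwise_dim_compatible(a_shape, ref_shape):
--     ndim_a = len(a_shape)
--     ndim_ref = len(ref_shape)
--     assert ndim_a == ndim_ref, 'Dimension not equal: {} vs {}.'.format(ndim_a, ndim_ref)
--     bad = next((i for i, (da, dr) in enumerate(zip(a_shape, ref_shape))
--                 if da != dr and da != 1), ndim_a)
--     return bad == ndim_a, [i for i in range(bad) if a_shape[i] == 1]
-- ===== Notes on version B (the rewrite author's own statement) =====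
-- stated objective: alternative
-- what changed: Replaces A's single accumulate-and-early-return loop by two separate passes: first find the cutoff index (first incompatible axis, defaulting to ndim), then collect the aggregated axes as a comprehension over the prefix before the cutoff.
import Mathlib
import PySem

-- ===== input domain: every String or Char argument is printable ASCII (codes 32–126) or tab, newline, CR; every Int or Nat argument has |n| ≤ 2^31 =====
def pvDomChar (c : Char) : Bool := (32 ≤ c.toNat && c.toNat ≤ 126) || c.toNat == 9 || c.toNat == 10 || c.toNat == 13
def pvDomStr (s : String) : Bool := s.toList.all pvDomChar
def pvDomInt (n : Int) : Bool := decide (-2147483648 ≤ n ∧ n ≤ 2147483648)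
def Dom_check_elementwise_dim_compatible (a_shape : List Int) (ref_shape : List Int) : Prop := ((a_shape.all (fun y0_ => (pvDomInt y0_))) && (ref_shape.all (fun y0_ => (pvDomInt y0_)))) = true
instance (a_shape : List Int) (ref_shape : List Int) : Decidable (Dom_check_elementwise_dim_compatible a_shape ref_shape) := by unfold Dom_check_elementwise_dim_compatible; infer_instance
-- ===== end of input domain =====

-- B splits A's single accumulate-and-early-return loop into a find-cutoff pass plus a
-- prefix-collect comprehension (objective: alternative decomposition, same cost).

-- ===== PORT A =====
-- the for-loop of A: state = (index i, aggregated_axes acc); early return on incompatible axis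
def ceLoopA : List (Int × Int) → Int → List Int → Bool × List Int
  | [], _, acc => (true, acc)
  | (da, dr) :: rest, i, acc =>
    if da ≠ dr ∧ da ≠ 1 then (false, acc)
    else if da = 1 then ceLoopA rest (i + 1) (acc ++ [i])
    else ceLoopA rest (i + 1) acc

def check_elementwise_dim_compatible (a_shape : List Int) (ref_shape : List Int) : Bool × List Int :=
  ceLoopA (a_shape.zip ref_shape) 0 []

-- ===== PORT B =====
-- the generator scanned by next(..., ndim): first index with da != dr and da != 1, else ndim
def ceFindBad : List (Int × Int) → Int → Int
  | [], i => i
  | (da, dr) :: rest, i => if da ≠ dr ∧ da ≠ 1 then i else ceFindBad rest (i + 1)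

def check_elementwise_dim_compatible_alt (a_shape : List Int) (ref_shape : List Int) : Bool × List Int :=
  let ndim_a : Int := a_shape.length
  let bad : Int := ceFindBad (a_shape.zip ref_shape) 0
  (decide (bad = ndim_a),
   (PySem.List.pyRange 0 bad 1).filter (fun i => PySem.List.pyGet? a_shape i == some 1))

-- ===== PRECONDITION & SPEC =====
-- A (and B) raise AssertionError when the two shapes have different lengths; exactly that is excluded.
def Pre_check_elementwise_dim_compatible (a_shape : List Int) (ref_shape : List Int) : Prop :=
  a_shape.length = ref_shape.length
instance (a_shape : List Int) (ref_shape : List Int) : Decidable (Pre_check_elementwise_dim_compatible a_shape ref_shape) := by unfold Pre_check_elementwise_dim_compatible; infer_instance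

def pvWitness_check_elementwise_dim_compatible : List Int × List Int := ([1, 3, 1], [2, 3, 4])

def Spec_check_elementwise_dim_compatible (a_shape : List Int) (ref_shape : List Int) (out : Bool × List Int) : Prop := out = check_elementwise_dim_compatible_alt a_shape ref_shape
instance (a_shape : List Int) (ref_shape : List Int) (out : Bool × List Int) : Decidable (Spec_check_elementwise_dim_compatible a_shape ref_shape out) := by unfold Spec_check_elementwise_dim_compatible; infer_instance

-- ===== CLAIM (what is proved, stated in full; the proofs are below) =====
def Claim_equal_check_elementwise_dim_compatible : Prop := ∀ (a_shape : List Int) (ref_shape : List Int), Dom_check_elementwise_dim_compatible a_shape ref_shape → Pre_check_elementwise_dim_compatible a_shape ref_shape → Spec_check_elementwise_dim_compatible a_shape ref_shape (check_elementwise_dim_compatible a_shape ref_shape)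

-- ===== LEMMAS AND PROOFS =====

-- proof-side: position of the first breaking pair (length of the list if none)
def ceFb : List (Int × Int) → Nat
  | [] => 0
  | (da, dr) :: rest => if da ≠ dr ∧ da ≠ 1 then 0 else ceFb rest + 1

-- proof-side: indices (offset by i) of ones in the prefix before the break
def ceOnesPref : List (Int × Int) → Int → List Int
  | [], _ => []
  | (da, dr) :: rest, i =>
    if da ≠ dr ∧ da ≠ 1 then []
    else (if da = 1 then [i] else []) ++ ceOnesPref rest (i + 1)

-- proof-side: indices of ones among the first b entries
def ceOnesTake : List Int → Int → Nat → List Int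
  | _, _, 0 => []
  | [], _, _ + 1 => []
  | x :: xs, i, b + 1 => (if x = 1 then [i] else []) ++ ceOnesTake xs (i + 1) b

theorem ceFb_le_length (l : List (Int × Int)) : ceFb l ≤ l.length := by
  induction l with
  | nil => simp [ceFb]
  | cons p rest ih =>
    obtain ⟨da, dr⟩ := p
    simp only [ceFb, List.length_cons]
    split <;> omega

theorem ceFindBad_eq (l : List (Int × Int)) : ∀ i : Int, ceFindBad l i = i + ceFb l := by
  induction l with
  | nil => intro i; simp [ceFindBad, ceFb]
  | cons p rest ih =>
    obtain ⟨da, dr⟩ := p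
    intro i
    simp only [ceFindBad, ceFb]
    split
    · simp
    · rw [ih]; push_cast; ring

theorem ceLoopA_eq (l : List (Int × Int)) :
    ∀ (i : Int) (acc : List Int),
      ceLoopA l i acc = (decide (ceFb l = l.length), acc ++ ceOnesPref l i) := by
  induction l with
  | nil => intro i acc; simp [ceLoopA, ceFb, ceOnesPref]
  | cons p rest ih =>
    obtain ⟨da, dr⟩ := p
    intro i acc
    simp only [ceLoopA, ceFb, ceOnesPref, List.length_cons]
    split
    · simp
    · rw [ih, ih]
      split <;> simp [List.append_assoc]

theorem ceOnesPref_eq_take (l : List (Int × Int)) :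
    ∀ i : Int, ceOnesPref l i = ceOnesTake (l.map Prod.fst) i (ceFb l) := by
  induction l with
  | nil => intro i; simp [ceOnesPref, ceFb, ceOnesTake]
  | cons p rest ih =>
    obtain ⟨da, dr⟩ := p
    intro i
    simp only [ceOnesPref, ceFb, List.map_cons]
    split
    · simp [ceOnesTake]
    · simp [ceOnesTake, ih]

theorem ceOnesTake_succ (b : Nat) :
    ∀ (a : List Int) (i : Int), b < a.length →
      ceOnesTake a i (b + 1) =
        ceOnesTake a i b ++ (if a[b]? = some 1 then [i + b] else []) := by
  induction b with
  | zero =>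
    intro a i h
    match a with
    | x :: xs =>
      simp only [ceOnesTake, List.getElem?_cons_zero]
      by_cases hx : x = 1 <;> simp [hx]
  | succ b ih =>
    intro a i h
    match a with
    | x :: xs =>
      simp only [ceOnesTake, List.getElem?_cons_succ]
      rw [ih xs (i + 1) (by simpa using Nat.lt_of_succ_lt_succ h)]
      simp only [List.append_assoc]
      congr 2
      split <;> simp <;> ring_nf

theorem ceFilter_range (a : List Int) (b : Nat) (hb : b ≤ a.length) :
    (PySem.List.pyRange 0 (b : Int) 1).filter
        (fun i => PySem.List.pyGet? a i == some 1) = ceOnesTake a 0 b := by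
  induction b with
  | zero => simp [ceOnesTake]
  | succ b ih =>
    have hb' : b ≤ a.length := Nat.le_of_succ_le hb
    have hsplit : PySem.List.pyRange 0 ((b : Int) + 1) 1
        = PySem.List.pyRange 0 (b : Int) 1 ++ [(b : Int)] :=
      PySem.List.pyRange_one_succ_right (by positivity)
    have hcast : ((b + 1 : Nat) : Int) = (b : Int) + 1 := by push_cast; ring
    rw [hcast, hsplit, List.filter_append, ih hb',
        ceOnesTake_succ b a 0 (by omega)]
    congr 1
    simp only [List.filter, PySem.List.pyGet?_natCast]
    by_cases h : a[b]? = some 1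
    · simp [h]
    · have hf : (a[b]? == some 1) = false := by simpa using h
      simp [hf, h]

-- ===== VERDICT (by name: the statement is the Claim_ definition above) =====
theorem check_elementwise_dim_compatible_spec : Claim_equal_check_elementwise_dim_compatible := by
  intro a_shape ref_shape _ hpre
  unfold Spec_check_elementwise_dim_compatible
  unfold check_elementwise_dim_compatible check_elementwise_dim_compatible_alt
  have hlen : (a_shape.zip ref_shape).length = a_shape.length := by
    rw [List.length_zip, hpre, min_self]
  have hfb := ceFb_le_length (a_shape.zip ref_shape)
  rw [ceLoopA_eq, ceFindBad_eq]
  simp only [zero_add, List.nil_append]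
  have hfst : (a_shape.zip ref_shape).map Prod.fst = a_shape := by
    exact List.map_fst_zip (le_of_eq hpre)
  have h2 : (PySem.List.pyRange 0 ((ceFb (a_shape.zip ref_shape) : Nat) : Int) 1).filter
      (fun i => PySem.List.pyGet? a_shape i == some 1)
      = ceOnesTake a_shape 0 (ceFb (a_shape.zip ref_shape)) := by
    exact ceFilter_range a_shape _ (by omega)
  rw [ceOnesPref_eq_take, hfst, ← h2]
  congr 1
  rw [hlen]
  simp
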